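-- pv_equiv track=rewrite | github.com/SFU-MARS/optimized_dp | MRAG/utilities.py | stoped_check
-- ===== SOURCE A (Python) =====
-- def stoped_check(attackers_status, attackers_arrived):
--     index = []
--     for i, capture in enumerate(attackers_status):
--         if capture:
--             index.append(i)
--     for j, arrived in enumerate(attackers_arrived):
--         if arrived:
--             index.append(j)
--     return sorted(index)
-- ===== SOURCE B (Python) =====
-- def stoped_check(attackers_status, attackers_arrived):
--     out = []
--     k = 0
--     m = len(attackers_status)
--     n = len(attackers_arrived)
--     while k < m or k < n:
--         if k < m and attackers_status[k]:
--             out.append(k)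
--         if k < n and attackers_arrived[k]:
--             out.append(k)
--         k += 1
--     return out
-- ===== Notes on version B (the rewrite author's own statement) =====
-- stated objective: alternative
-- what changed: Replaced the two separate enumerate passes followed by a sort with a single merged index-range sweep that emits indices from both lists in ascending order, so no sort is needed.
import Mathlib
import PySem

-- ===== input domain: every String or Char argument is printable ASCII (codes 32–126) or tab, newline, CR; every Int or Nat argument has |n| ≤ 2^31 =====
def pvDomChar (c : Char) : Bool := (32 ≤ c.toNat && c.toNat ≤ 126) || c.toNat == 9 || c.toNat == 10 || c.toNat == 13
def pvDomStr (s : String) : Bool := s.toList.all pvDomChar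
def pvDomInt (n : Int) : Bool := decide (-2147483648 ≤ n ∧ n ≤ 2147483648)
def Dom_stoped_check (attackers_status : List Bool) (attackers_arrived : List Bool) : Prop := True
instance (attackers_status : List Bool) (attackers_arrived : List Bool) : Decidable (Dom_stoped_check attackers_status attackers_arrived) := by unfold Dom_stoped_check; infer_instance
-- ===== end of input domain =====

-- B replaces A's two enumerate passes plus a final sort by one merged index sweep
-- that emits indices from both lists in ascending order (objective: alternative, no sort needed).

-- ===== PORT A =====
def stoped_check (attackers_status : List Bool) (attackers_arrived : List Bool) : List Int :=
  let index : List Int := []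
  let index := (PySem.List.enumerate attackers_status 0).foldl
    (fun acc x => if x.2 then acc ++ [x.1] else acc) index
  let index := (PySem.List.enumerate attackers_arrived 0).foldl
    (fun acc x => if x.2 then acc ++ [x.1] else acc) index
  PySem.List.sorted index (fun x => x) false

-- ===== PORT B =====
-- the while loop of Source B; indexing `attackers_status[k]` is exact since it is guarded by k < len
def stoped_check_loop (s a : List Bool) (k : Nat) (out : List Int) : List Int :=
  if k < s.length ∨ k < a.length then
    let out1 := if k < s.length ∧ s.getD k false = true then out ++ [(k : Int)] else out
    let out2 := if k < a.length ∧ a.getD k false = true then out1 ++ [(k : Int)] else out1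
    stoped_check_loop s a (k + 1) out2
  else out
termination_by max s.length a.length - k
decreasing_by omega

def stoped_check_alt (attackers_status : List Bool) (attackers_arrived : List Bool) : List Int :=
  stoped_check_loop attackers_status attackers_arrived 0 []

-- ===== PRECONDITION & SPEC =====
def Spec_stoped_check (attackers_status : List Bool) (attackers_arrived : List Bool) (out : List Int) : Prop := out = stoped_check_alt attackers_status attackers_arrived
instance (attackers_status : List Bool) (attackers_arrived : List Bool) (out : List Int) : Decidable (Spec_stoped_check attackers_status attackers_arrived out) := by unfold Spec_stoped_check; infer_instance

-- ===== CLAIM (what is proved, stated in full; the proofs are below) =====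
def Claim_equal_stoped_check : Prop := ∀ (attackers_status : List Bool) (attackers_arrived : List Bool), Dom_stoped_check attackers_status attackers_arrived → Spec_stoped_check attackers_status attackers_arrived (stoped_check attackers_status attackers_arrived)

-- ===== LEMMAS AND PROOFS =====

-- indices (with absolute integer offset) of the true entries of a list
def idxList (s : List Bool) (j : Int) : List Int :=
  match s with
  | [] => []
  | b :: t => (if b then [j] else []) ++ idxList t (j + 1)

-- the contribution of index k of list s (one step of B's loop body)
def blk (s : List Bool) (k : Nat) : List Int :=
  if k < s.length ∧ s.getD k false = true then [(k : Int)] else []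

theorem idx_enum (s : List Bool) (j : Int) :
    ((PySem.List.enumerate s j).filter (fun x => x.2)).map (fun x => x.1) = idxList s j := by
  induction s generalizing j with
  | nil => simp [idxList, PySem.List.enumerate_nil]
  | cons b t ih =>
    cases b <;> simp [idxList, PySem.List.enumerate_cons, ih]

theorem loop_stop (s a : List Bool) (k : Nat) (out : List Int)
    (hg : ¬ (k < s.length ∨ k < a.length)) : stoped_check_loop s a k out = out := by
  rw [stoped_check_loop]; simp [hg]

theorem loop_step (s a : List Bool) (k : Nat) (out : List Int)
    (hg : k < s.length ∨ k < a.length) :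
    stoped_check_loop s a k out = stoped_check_loop s a (k + 1) (out ++ blk s k ++ blk a k) := by
  rw [stoped_check_loop]
  simp only [hg, if_pos, blk]
  congr 1
  split_ifs <;> simp

theorem loop_acc (fuel : Nat) : ∀ (s a : List Bool) (k : Nat) (out : List Int),
    max s.length a.length - k = fuel →
    stoped_check_loop s a k out = out ++ stoped_check_loop s a k [] := by
  induction fuel with
  | zero =>
    intro s a k out h
    have hg : ¬ (k < s.length ∨ k < a.length) := by omega
    rw [loop_stop _ _ _ _ hg, loop_stop _ _ _ _ hg]
    simp
  | succ n ih =>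
    intro s a k out h
    by_cases hg : k < s.length ∨ k < a.length
    · rw [loop_step _ _ _ _ hg, loop_step _ _ _ ([]) hg,
        ih s a (k + 1) _ (by omega), ih s a (k + 1) _ (by omega)]
      rw [ih s a (k + 1) ([] ++ blk s k ++ blk a k) (by omega)]
      simp
    · rw [loop_stop _ _ _ _ hg, loop_stop _ _ _ _ hg]; simp

theorem loop_unfold (s a : List Bool) (k : Nat)
    (hg : k < s.length ∨ k < a.length) :
    stoped_check_loop s a k [] = blk s k ++ blk a k ++ stoped_check_loop s a (k + 1) [] := by
  rw [loop_step _ _ _ _ hg, loop_acc (max s.length a.length - (k + 1)) s a (k + 1) _ rfl]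
  simp

theorem mem_blk {s : List Bool} {k : Nat} {x : Int} (hx : x ∈ blk s k) : x = (k : Int) := by
  unfold blk at hx
  split_ifs at hx <;> simp_all

theorem loop_lb (fuel : Nat) : ∀ (s a : List Bool) (k : Nat),
    max s.length a.length - k = fuel →
    ∀ x ∈ stoped_check_loop s a k [], (k : Int) ≤ x := by
  induction fuel with
  | zero =>
    intro s a k h x hx
    rw [loop_stop _ _ _ _ (by omega)] at hx
    simp at hx
  | succ n ih =>
    intro s a k h x hx
    by_cases hg : k < s.length ∨ k < a.length
    · rw [loop_unfold _ _ _ hg] at hx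
      simp only [List.mem_append] at hx
      rcases hx with (hx | hx) | hx
      · exact le_of_eq (mem_blk hx).symm
      · exact le_of_eq (mem_blk hx).symm
      · have := ih s a (k + 1) (by omega) x hx
        push_cast at this ⊢
        omega
    · rw [loop_stop _ _ _ _ hg] at hx
      simp at hx

theorem blk_pairwise (s : List Bool) (k : Nat) : (blk s k).Pairwise (· ≤ ·) := by
  unfold blk; split_ifs <;> simp

theorem loop_pairwise (fuel : Nat) : ∀ (s a : List Bool) (k : Nat),
    max s.length a.length - k = fuel →
    (stoped_check_loop s a k []).Pairwise (· ≤ ·) := by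
  induction fuel with
  | zero =>
    intro s a k h
    rw [loop_stop _ _ _ _ (by omega)]
    simp
  | succ n ih =>
    intro s a k h
    by_cases hg : k < s.length ∨ k < a.length
    · rw [loop_unfold _ _ _ hg]
      have hlb : ∀ x ∈ stoped_check_loop s a (k + 1) [], (k : Int) ≤ x := by
        intro x hx
        have := loop_lb n s a (k + 1) (by omega) x hx
        push_cast at this ⊢
        omega
      refine (List.pairwise_append).2 ⟨(List.pairwise_append).2
        ⟨blk_pairwise s k, blk_pairwise a k, ?_⟩, ih s a (k + 1) (by omega), ?_⟩
      · intro x hx y hy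
        rw [mem_blk hx, mem_blk hy]
      · intro x hx y hy
        rcases (List.mem_append).1 hx with hx | hx <;>
          rw [mem_blk hx] <;> exact hlb y hy
    · rw [loop_stop _ _ _ _ hg]
      simp

theorem idx_drop_blk (s : List Bool) (k : Nat) (hk : k < s.length ∨ s.length ≤ k) :
    idxList (s.drop k) (k : Int) = blk s k ++ idxList (s.drop (k + 1)) ((k + 1 : Nat) : Int) := by
  by_cases h : k < s.length
  · rw [List.drop_eq_getElem_cons h, idxList]
    have : s.getD k false = s[k] := by
      simp [List.getD_eq_getElem?_getD, List.getElem?_eq_getElem h]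
    simp only [blk, h, true_and, this]
    cases hb : s[k] <;> simp
  · have hle : s.length ≤ k := by omega
    simp [List.drop_eq_nil_of_le hle, List.drop_eq_nil_of_le (by omega : s.length ≤ k + 1),
      idxList, blk, h]

theorem loop_perm (fuel : Nat) : ∀ (s a : List Bool) (k : Nat),
    max s.length a.length - k = fuel →
    (stoped_check_loop s a k []).Perm
      (idxList (s.drop k) (k : Int) ++ idxList (a.drop k) (k : Int)) := by
  induction fuel with
  | zero =>
    intro s a k h
    rw [loop_stop _ _ _ _ (by omega)]
    simp [List.drop_eq_nil_of_le (by omega : s.length ≤ k),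
      List.drop_eq_nil_of_le (by omega : a.length ≤ k), idxList]
  | succ n ih =>
    intro s a k h
    by_cases hg : k < s.length ∨ k < a.length
    · rw [loop_unfold _ _ _ hg, idx_drop_blk s k (by omega), idx_drop_blk a k (by omega)]
      have hrec := ih s a (k + 1) (by omega)
      set bs := blk s k
      set ba := blk a k
      set Rs := idxList (s.drop (k + 1)) ((k + 1 : Nat) : Int)
      set Ra := idxList (a.drop (k + 1)) ((k + 1 : Nat) : Int)
      have h1 : ((bs ++ ba) ++ stoped_check_loop s a (k + 1) []).Perm
          ((bs ++ ba) ++ (Rs ++ Ra)) := hrec.append_left _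
      have h3 : (bs ++ ((ba ++ Rs) ++ Ra)).Perm (bs ++ ((Rs ++ ba) ++ Ra)) :=
        (List.perm_append_comm.append_right Ra).append_left bs
      refine List.Perm.trans ?_ (by simpa [List.append_assoc] using h3)
      simpa [List.append_assoc] using h1
    · rw [loop_stop _ _ _ _ hg]
      simp [List.drop_eq_nil_of_le (by omega : s.length ≤ k),
        List.drop_eq_nil_of_le (by omega : a.length ≤ k), idxList]

-- ===== VERDICT (by name: the statement is the Claim_ definition above) =====
theorem stoped_check_spec : Claim_equal_stoped_check := by
  intro s a _
  unfold Spec_stoped_check stoped_check stoped_check_alt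
  simp only [PySem.List.foldl_append_if, List.nil_append]
  rw [idx_enum, idx_enum]
  have hperm := loop_perm (max s.length a.length) s a 0 (by omega)
  have hpw := loop_pairwise (max s.length a.length) s a 0 (by omega)
  simp only [List.drop_zero, Nat.cast_zero] at hperm
  exact PySem.List.sorted_id_eq_of_perm_of_pairwise _ _ hperm hpw
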